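-- pv_equiv track=rewrite | github.com/MCastelH/PRACTICUM | auxiliary_functions.py | obtenir_valor
-- ===== SOURCE A (Python) =====
-- def obtenir_valor(diccionaris, clau):
--     """
--     Obté el valor d'una clau específica de l'últim diccionari vàlid que conté aquesta clau.
--
--     Paràmetres:
--         - diccionaris: llista de diccionaris.
--         - clau: Clau el valor de la qual es desitja extreure de cada diccionari.
--
--     Retorna:
--         - Valor de la clau especificada si aquesta es troba en l'últim diccionari vàlid.
--         - None si la clau no es troba en cap diccionari vàlid.
--     """
--     if not isinstance(diccionaris, list) or not diccionaris:
--         return None  # Retornar None si l'entrada no és una llista vàlida o està buida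
--
--     valor = None  # Valor per defecte
--
--     # Iterar cap enrere en la llista de diccionaris
--     for dic in reversed(diccionaris):
--         if isinstance(dic, dict):
--             if clau in dic:
--                 valor = dic[clau]
--                 break  # Sortir del bucle si es troba la clau en el diccionari
--
--     return valor  # Retornar el valor trobat o None si la clau no s'ha trobat
-- ===== SOURCE B (Python) =====
-- def obtenir_valor(diccionaris, clau):
--     if not isinstance(diccionaris, list) or not diccionaris:
--         return None
--     valor = None
--     # Forward pass: later matches overwrite earlier ones, so the last
--     # valid dict containing the key wins -- same result as A's
--     # reversed-with-break scan.
--     for dic in diccionaris: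
--         if isinstance(dic, dict) and clau in dic:
--             valor = dic[clau]
--     return valor
-- ===== Notes on version B (the rewrite author's own statement) =====
-- stated objective: alternative
-- what changed: Replaces A's reversed iteration with an early break by a single forward pass that overwrites the accumulator on every match, so the last matching dict wins without reversing or breaking.
import Mathlib
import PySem

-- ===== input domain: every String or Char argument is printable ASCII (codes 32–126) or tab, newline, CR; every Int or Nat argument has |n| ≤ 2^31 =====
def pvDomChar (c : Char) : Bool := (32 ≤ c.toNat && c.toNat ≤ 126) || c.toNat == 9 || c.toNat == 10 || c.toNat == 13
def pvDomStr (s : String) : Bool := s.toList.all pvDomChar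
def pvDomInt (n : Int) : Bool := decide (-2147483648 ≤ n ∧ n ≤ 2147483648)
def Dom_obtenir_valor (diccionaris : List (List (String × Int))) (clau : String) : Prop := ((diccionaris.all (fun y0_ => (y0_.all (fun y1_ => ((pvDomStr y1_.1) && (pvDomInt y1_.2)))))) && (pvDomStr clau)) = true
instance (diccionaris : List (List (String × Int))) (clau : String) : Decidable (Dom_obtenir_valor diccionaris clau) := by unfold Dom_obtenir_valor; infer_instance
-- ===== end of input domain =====

-- B replaces A's reversed scan with an early break by a forward overwrite pass (alternative decomposition, same cost).


-- shared primitive: Python 'clau in dic' / 'dic[clau]' on an association-list dict (first match)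
def pyLookup (dic : List (String × Int)) (clau : String) : Option Int :=
  (PySem.Dict.mk dic).get? clau

-- ===== PORT A =====
-- A's loop over reversed(diccionaris) with break: return at the first dict containing clau.
def obtenirLoopA (rev : List (List (String × Int))) (clau : String) : Option Int :=
  match rev with
  | [] => none
  | dic :: rest =>
    match pyLookup dic clau with
    | some v => some v        -- valor = dic[clau]; break
    | none => obtenirLoopA rest clau

def obtenir_valor (diccionaris : List (List (String × Int))) (clau : String) : Option Int :=
  if diccionaris = [] then none
  else obtenirLoopA diccionaris.reverse clau

-- ===== PORT B =====
-- forward fold: every match overwrites valor, so the last match wins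
def obtenir_valor_alt (diccionaris : List (List (String × Int))) (clau : String) : Option Int :=
  if diccionaris = [] then none
  else diccionaris.foldl
    (fun valor dic =>
      match pyLookup dic clau with
      | some v => some v
      | none => valor)
    none

-- ===== PRECONDITION & SPEC =====
def Spec_obtenir_valor (diccionaris : List (List (String × Int))) (clau : String) (out : Option Int) : Prop := out = obtenir_valor_alt diccionaris clau
instance (diccionaris : List (List (String × Int))) (clau : String) (out : Option Int) : Decidable (Spec_obtenir_valor diccionaris clau out) := by unfold Spec_obtenir_valor; infer_instance

-- ===== CLAIM (what is proved, stated in full; the proofs are below) =====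
def Claim_equal_obtenir_valor : Prop := ∀ (diccionaris : List (List (String × Int))) (clau : String), Dom_obtenir_valor diccionaris clau → Spec_obtenir_valor diccionaris clau (obtenir_valor diccionaris clau)

-- ===== LEMMAS AND PROOFS =====
theorem obtenirLoopA_append (l1 l2 : List (List (String × Int))) (clau : String) :
    obtenirLoopA (l1 ++ l2) clau =
      match obtenirLoopA l1 clau with
      | some v => some v
      | none => obtenirLoopA l2 clau := by
  induction l1 with
  | nil => simp [obtenirLoopA]
  | cons d rest ih =>
    simp only [List.cons_append, obtenirLoopA]
    cases pyLookup d clau <;> simp [ih]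

theorem foldl_eq_loopA_rev (ds : List (List (String × Int))) (clau : String) (acc : Option Int) :
    ds.foldl
      (fun valor dic =>
        match pyLookup dic clau with
        | some v => some v
        | none => valor)
      acc =
      match obtenirLoopA ds.reverse clau with
      | some v => some v
      | none => acc := by
  induction ds generalizing acc with
  | nil => simp [obtenirLoopA]
  | cons d rest ih =>
    simp only [List.foldl_cons, List.reverse_cons, obtenirLoopA_append, ih]
    cases obtenirLoopA rest.reverse clau <;> cases h : pyLookup d clau <;>
      simp [obtenirLoopA, h]

-- ===== VERDICT (by name: the statement is the Claim_ definition above) =====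
theorem obtenir_valor_spec : Claim_equal_obtenir_valor := by
  intro ds clau _
  unfold Spec_obtenir_valor obtenir_valor obtenir_valor_alt
  by_cases h : ds = []
  · simp [h]
  · simp only [h, if_false]
    rw [foldl_eq_loopA_rev]
    cases obtenirLoopA ds.reverse clau <;> simp
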